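-- pv_equiv track=rewrite | github.com/No-ONEEEEE/AAD-Washi-O-Washi | Exact_matching_analysis/Project/algorithms/naive_string_matching_parallel.py | naive_search_chunk
-- ===== SOURCE A (Python) =====
-- def naive_search_chunk(text_chunk, pattern, chunk_start, overlap_size):
--     """
--     Search for pattern in a text chunk using naive string matching.
--
--     Args:
--         text_chunk: Chunk of text to search in
--         pattern: Pattern to search for
--         chunk_start: Starting index of this chunk in original text
--         overlap_size: Size of overlap with previous chunk
--
--     Returns:
--         List of match indices (adjusted for chunk position)
--     """
--     n = len(text_chunk)
--     m = len(pattern)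
--
--     if m > n:
--         return []
--
--     matches = []
--
--     for i in range(n - m + 1):
--         match = True
--         for j in range(m):
--             if text_chunk[i + j] != pattern[j]:
--                 match = False
--                 break
--
--         if match:
--             match_pos = i
--             # Only include matches not in overlap region (except first chunk)
--             if chunk_start == 0 or match_pos >= overlap_size:
--                 matches.append(chunk_start + match_pos)
--
--     return matches
-- ===== SOURCE B (Python) =====
-- def naive_search_chunk(text_chunk, pattern, chunk_start, overlap_size):
--     """Occurrences of pattern in text_chunk (adjusted by chunk_start), skipping
--     the overlap region except in the first chunk: scan with str.find instead of
--     a hand-written character-compare double loop."""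
--     start = 0 if chunk_start == 0 else max(0, overlap_size)
--     matches = []
--     i = text_chunk.find(pattern, start)
--     while i != -1:
--         matches.append(chunk_start + i)
--         i = text_chunk.find(pattern, i + 1)
--     return matches
-- ===== Notes on version B (the rewrite author's own statement) =====
-- stated objective: faster
-- what changed: Replaces the hand-written per-position character-comparison double loop by a str.find-driven scan that jumps from occurrence to occurrence, starting directly at the first admissible index (0, or max(0, overlap_size) for non-first chunks) instead of filtering matches afterwards.
import Mathlib
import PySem

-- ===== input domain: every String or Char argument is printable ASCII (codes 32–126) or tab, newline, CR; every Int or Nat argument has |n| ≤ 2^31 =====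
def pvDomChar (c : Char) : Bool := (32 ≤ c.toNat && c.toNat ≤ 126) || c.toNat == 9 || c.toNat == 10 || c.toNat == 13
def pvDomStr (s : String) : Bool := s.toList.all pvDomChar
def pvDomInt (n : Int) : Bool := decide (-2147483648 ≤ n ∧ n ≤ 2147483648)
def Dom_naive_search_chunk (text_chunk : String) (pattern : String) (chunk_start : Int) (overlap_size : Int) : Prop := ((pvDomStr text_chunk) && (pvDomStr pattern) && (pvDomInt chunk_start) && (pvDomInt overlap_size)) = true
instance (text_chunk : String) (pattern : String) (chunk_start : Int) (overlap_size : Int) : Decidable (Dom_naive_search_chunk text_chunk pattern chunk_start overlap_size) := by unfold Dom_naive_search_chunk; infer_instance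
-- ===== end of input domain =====

-- B replaces A's per-position character-compare double loop by a str.find-driven scan
-- that jumps from occurrence to occurrence, starting at the first admissible index.

-- ===== PORT A =====
-- inner loop 'for j in range(m): if text_chunk[i+j] != pattern[j]: match = False; break'
def pvAmatch (t p : List Char) (i : Int) : List Int → Bool
  | [] => true
  | j :: js =>
    if PySem.List.pyGet? t (i + j) ≠ PySem.List.pyGet? p j then false
    else pvAmatch t p i js

def naive_search_chunk (text_chunk : String) (pattern : String) (chunk_start : Int) (overlap_size : Int) : List Int :=
  let t := text_chunk.toList
  let p := pattern.toList
  let n : Int := PySem.List.len t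
  let m : Int := PySem.List.len p
  if m > n then []
  else
    (PySem.List.pyRange 0 (n - m + 1) 1).foldl
      (fun ms i =>
        if pvAmatch t p i (PySem.List.pyRange 0 m 1) then
          if chunk_start = 0 ∨ overlap_size ≤ i then ms ++ [chunk_start + i]
          else ms
        else ms) []

-- ===== PORT B =====
-- termination facts for the while loop: a successful find lands at an index ≥ s and ≤ len
lemma pvFind_bounds (t p : List Char) (s : Nat)
    (h : PySem.Chars.findFrom t p (s : Int) ≠ -1) :
    s ≤ (PySem.Chars.findFrom t p (s : Int)).toNat ∧ s ≤ t.length := by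
  by_cases hs : s ≤ t.length
  · have hspec := PySem.Chars.findFrom_natCast_spec t p s hs h
    have h1 := hspec.1
    constructor
    · omega
    · exact hs
  · exfalso
    apply h
    simp only [PySem.Chars.findFrom]
    have h0 : ¬ ((s : Int) < 0) := by omega
    have h1 : (t.length : Int) < (s : Int) := by omega
    simp [h0, h1]

-- 'i = text_chunk.find(pattern, start); while i != -1: matches.append(chunk_start + i); i = find(pattern, i+1)'
def pvLoopB (t p : List Char) (chunk_start : Int) (s : Nat) : List Int :=
  let i := PySem.Chars.findFrom t p (s : Int)
  if h : i = -1 then []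
  else (chunk_start + i) :: pvLoopB t p chunk_start (i.toNat + 1)
termination_by t.length + 1 - s
decreasing_by
  have := pvFind_bounds t p s h
  omega

def naive_search_chunk_alt (text_chunk : String) (pattern : String) (chunk_start : Int) (overlap_size : Int) : List Int :=
  let start : Int := if chunk_start = 0 then 0 else max 0 overlap_size
  pvLoopB text_chunk.toList pattern.toList chunk_start start.toNat

-- ===== PRECONDITION & SPEC =====
def Spec_naive_search_chunk (text_chunk : String) (pattern : String) (chunk_start : Int) (overlap_size : Int) (out : List Int) : Prop := out = naive_search_chunk_alt text_chunk pattern chunk_start overlap_size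
instance (text_chunk : String) (pattern : String) (chunk_start : Int) (overlap_size : Int) (out : List Int) : Decidable (Spec_naive_search_chunk text_chunk pattern chunk_start overlap_size out) := by unfold Spec_naive_search_chunk; infer_instance

-- ===== CLAIM (what is proved, stated in full; the proofs are below) =====
def Claim_equal_naive_search_chunk : Prop := ∀ (text_chunk : String) (pattern : String) (chunk_start : Int) (overlap_size : Int), Dom_naive_search_chunk text_chunk pattern chunk_start overlap_size → Spec_naive_search_chunk text_chunk pattern chunk_start overlap_size (naive_search_chunk text_chunk pattern chunk_start overlap_size)

-- ===== LEMMAS AND PROOFS =====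
-- the occurrences of p in t at positions in [s, len t - len p], in increasing order
def pvOcc (t p : List Char) (s : Int) : List Int :=
  (PySem.List.pyRange s ((t.length : Int) - (p.length : Int) + 1) 1).filter
    (fun i => decide (p <+: t.drop i.toNat))

lemma pvAmatch_eq (t p : List Char) (i k : Nat) (him : i + p.length ≤ t.length)
    (hk : k ≤ p.length) :
    pvAmatch t p (i : Int) (PySem.List.pyRange (k : Int) (p.length : Int) 1)
      = decide (p.drop k <+: t.drop (i + k)) := by
  induction hfuel : p.length - k generalizing k with
  | zero =>
    have hk' : k = p.length := by omega
    subst hk'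
    rw [PySem.List.pyRange_one_eq_nil (by omega)]
    simp [pvAmatch, List.drop_length]
  | succ fuel ih =>
    have hklt : k < p.length := by omega
    have hik : i + k < t.length := by omega
    rw [PySem.List.pyRange_one_cons (by exact_mod_cast hklt)]
    have hcast : (i : Int) + (k : Int) = ((i + k : Nat) : Int) := by push_cast; ring
    have hget_t : PySem.List.pyGet? t ((i : Int) + (k : Int)) = some (t[i + k]'hik) := by
      rw [hcast, PySem.List.pyGet?_natCast, List.getElem?_eq_getElem hik]
    have hget_p : PySem.List.pyGet? p ((k : Nat) : Int) = some (p[k]'hklt) := by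
      rw [PySem.List.pyGet?_natCast, List.getElem?_eq_getElem hklt]
    have hrec : ((k : Nat) : Int) + 1 = ((k + 1 : Nat) : Int) := by push_cast; ring
    show (if PySem.List.pyGet? t ((i : Int) + (k : Nat)) ≠ PySem.List.pyGet? p (k : Nat) then false
          else pvAmatch t p (i : Int) (PySem.List.pyRange ((k : Nat) + 1) (p.length : Int) 1)) = _
    rw [hget_t, hget_p, hrec]
    have hsplit : (List.drop k p <+: List.drop (i + k) t)
        ↔ (p[k]'hklt = t[i + k]'hik ∧ List.drop (k + 1) p <+: List.drop (i + (k + 1)) t) := by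
      rw [List.drop_eq_getElem_cons hklt, List.drop_eq_getElem_cons hik, List.cons_prefix_cons,
        show i + (k + 1) = i + k + 1 from rfl]
    by_cases heq : t[i + k]'hik = p[k]'hklt
    · rw [if_neg (by simp [heq]), ih (k + 1) (by omega) (by omega)]
      simp [hsplit, heq]
    · rw [if_pos (by simp [heq])]
      symm
      rw [decide_eq_false_iff_not, hsplit]
      rintro ⟨h1, -⟩
      exact heq h1.symm

lemma pvFoldl_two_if {α β : Type} (P Q : α → Prop) [DecidablePred P] [DecidablePred Q]
    (f : α → β) (l : List α) (acc : List β) :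
    l.foldl (fun acc x => if P x then (if Q x then acc ++ [f x] else acc) else acc) acc
      = acc ++ (l.filter (fun x => decide (P x) && decide (Q x))).map f := by
  induction l generalizing acc with
  | nil => simp
  | cons x xs ih =>
    simp only [List.foldl_cons, List.filter_cons]
    by_cases hP : P x <;> by_cases hQ : Q x <;> simp [hP, hQ, ih]

lemma pvA_shape (text_chunk pattern : String) (cs os : Int) :
    naive_search_chunk text_chunk pattern cs os
      = ((pvOcc text_chunk.toList pattern.toList 0).filter
          (fun i => decide (cs = 0 ∨ os ≤ i))).map (fun i => cs + i) := by
  unfold naive_search_chunk pvOcc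
  simp only [PySem.List.len_eq]
  by_cases hmn : (pattern.toList.length : Int) > (text_chunk.toList.length : Int)
  · rw [if_pos hmn, PySem.List.pyRange_one_eq_nil (by omega)]
    simp
  · rw [if_neg hmn]
    refine Eq.trans (pvFoldl_two_if
      (fun i => pvAmatch text_chunk.toList pattern.toList i
        (PySem.List.pyRange 0 (pattern.toList.length : Int) 1) = true)
      (fun i => cs = 0 ∨ os ≤ i) (fun i => cs + i)
      (PySem.List.pyRange 0 ((text_chunk.toList.length : Int) - (pattern.toList.length : Int) + 1) 1) []) ?_
    rw [List.nil_append, List.filter_filter]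
    congr 1
    apply List.filter_congr
    intro x hx
    have hmem := PySem.List.mem_pyRange_one.mp hx
    have hx0 : x = ((x.toNat : Nat) : Int) := by omega
    have hmatch : pvAmatch text_chunk.toList pattern.toList x
        (PySem.List.pyRange 0 (pattern.toList.length : Int) 1)
        = decide (pattern.toList <+: text_chunk.toList.drop x.toNat) := by
      conv_lhs => rw [hx0, show ((0 : Int) = ((0 : Nat) : Int)) from rfl]
      rw [pvAmatch_eq text_chunk.toList pattern.toList x.toNat 0 (by omega) (by omega)]
      simp
    have hmatch2 : pvAmatch text_chunk.toList pattern.toList x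
        (PySem.List.pyRange 0 (pattern.length : Int) 1)
        = decide (pattern.toList <+: List.drop x.toNat text_chunk.toList) := by
      rw [← hmatch]
      congr 2
    simp [hmatch2, Bool.and_comm]

lemma pvLoopB_eq (t p : List Char) (cs : Int) (s : Nat) :
    pvLoopB t p cs s = (pvOcc t p (s : Int)).map (fun i => cs + i) := by
  induction s using pvLoopB.induct t p with
  | case1 s i hne =>
    rw [pvLoopB, dif_pos hne]
    have hocc : pvOcc t p (s : Int) = [] := by
      unfold pvOcc
      rw [List.filter_eq_nil_iff]
      intro a ha
      have hmem := PySem.List.mem_pyRange_one.mp ha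
      by_cases hs : s ≤ t.length
      · have hninf := (PySem.Chars.findFrom_natCast_eq_neg_one_iff t p s hs).mp hne
        simp only [decide_eq_true_eq]
        intro hpre
        apply hninf
        have hd : List.drop a.toNat t = List.drop (a.toNat - s) (List.drop s t) := by
          rw [List.drop_drop]
          congr 1
          omega
        rw [hd] at hpre
        exact hpre.isInfix.trans (List.drop_suffix _ _).isInfix
      · exfalso
        have : (t.length : Int) - (p.length : Int) + 1 ≤ (s : Int) := by omega
        omega
    rw [hocc]
    rfl
  | case2 s i hne ih =>
    have hb := pvFind_bounds t p s hne
    have hs : s ≤ t.length := hb.2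
    have hspec := PySem.Chars.findFrom_natCast_spec t p s hs hne
    set iI := PySem.Chars.findFrom t p (s : Int) with hi
    have hge0 : (0 : Int) ≤ iI := le_trans (by omega) hspec.1
    have hpre : p <+: List.drop iI.toNat t := hspec.2.1
    have hmin := hspec.2.2
    have hub : iI ≤ (t.length : Int) := by
      rw [hi, PySem.Chars.findFrom_natCast t p s hs]
      split_ifs with hf
      · omega
      · have h1 := PySem.Chars.find_le_length (t.drop s) p
        rw [List.length_drop] at h1
        omega
    have hlen : iI.toNat + p.length ≤ t.length := by
      have h2 := hpre.length_le
      rw [List.length_drop] at h2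
      omega
    have hocc : pvOcc t p (s : Int) = iI :: pvOcc t p ((iI.toNat + 1 : Nat) : Int) := by
      unfold pvOcc
      rw [PySem.List.pyRange_one_append (s : Int) iI ((t.length : Int) - (p.length : Int) + 1)
        hspec.1 (by omega), List.filter_append]
      have hleft : (PySem.List.pyRange (s : Int) iI 1).filter
          (fun i => decide (p <+: t.drop i.toNat)) = [] := by
        rw [List.filter_eq_nil_iff]
        intro a ha
        have hm := PySem.List.mem_pyRange_one.mp ha
        simp only [decide_eq_true_eq]
        intro hp
        exact hmin a.toNat (by omega) (by omega) hp
      rw [hleft, List.nil_append, PySem.List.pyRange_one_cons (by omega),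
        List.filter_cons_of_pos (by simp [hpre]),
        show ((iI.toNat + 1 : Nat) : Int) = iI + 1 by omega]
    rw [pvLoopB, dif_neg hne, ← hi, ih, hocc]
    simp
    rfl

lemma pvFilter_range (s : Nat) (X : Int) :
    (PySem.List.pyRange 0 X 1).filter (fun i => decide ((s : Int) ≤ i))
      = PySem.List.pyRange (s : Int) X 1 := by
  by_cases hX : X ≤ (s : Int)
  · rw [PySem.List.pyRange_one_eq_nil hX]
    rw [List.filter_eq_nil_iff]
    intro a ha
    have := PySem.List.mem_pyRange_one.mp ha
    simp
    omega
  · rw [PySem.List.pyRange_one_append 0 (s : Int) X (by omega) (by omega), List.filter_append]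
    have h1 : (PySem.List.pyRange 0 (s : Int) 1).filter (fun i => decide ((s : Int) ≤ i)) = [] := by
      rw [List.filter_eq_nil_iff]
      intro a ha
      have := PySem.List.mem_pyRange_one.mp ha
      simp
      omega
    have h2 : (PySem.List.pyRange (s : Int) X 1).filter (fun i => decide ((s : Int) ≤ i))
        = PySem.List.pyRange (s : Int) X 1 := by
      rw [List.filter_eq_self]
      intro a ha
      have := PySem.List.mem_pyRange_one.mp ha
      simp
      omega
    rw [h1, h2, List.nil_append]

-- ===== VERDICT (by name: the statement is the Claim_ definition above) =====
theorem naive_search_chunk_spec : Claim_equal_naive_search_chunk := by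
  intro text_chunk pattern cs os _
  unfold Spec_naive_search_chunk
  rw [pvA_shape]
  unfold naive_search_chunk_alt
  by_cases hcs : cs = 0
  · rw [if_pos hcs]
    show _ = pvLoopB text_chunk.toList pattern.toList cs (0 : Int).toNat
    rw [show ((0 : Int).toNat) = 0 from rfl, pvLoopB_eq]
    congr 1
    rw [show (((0 : Nat) : Int)) = (0 : Int) from rfl]
    apply List.filter_eq_self.mpr
    intro x hx
    simp [hcs]
  · rw [if_neg hcs]
    show _ = pvLoopB text_chunk.toList pattern.toList cs (max 0 os).toNat
    rw [pvLoopB_eq]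
    congr 1
    have hcast : (((max 0 os).toNat : Nat) : Int) = max 0 os := by omega
    have h1 : (pvOcc text_chunk.toList pattern.toList 0).filter (fun i => decide (cs = 0 ∨ os ≤ i))
        = (pvOcc text_chunk.toList pattern.toList 0).filter
            (fun i => decide ((((max 0 os).toNat : Nat) : Int) ≤ i)) := by
      apply List.filter_congr
      intro x hx
      have hx0 : (0 : Int) ≤ x := by
        unfold pvOcc at hx
        exact (PySem.List.mem_pyRange_one.mp (List.mem_of_mem_filter hx)).1
      rw [hcast, decide_eq_decide]
      constructor
      · rintro (h | h)
        · exact absurd h hcs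
        · omega
      · intro h
        right
        omega
    rw [h1]
    unfold pvOcc
    rw [List.filter_comm, pvFilter_range]
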